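-- pv_equiv track=rewrite | github.com/bvschaik/advent-of-code | 2020/day19.py | is_valid_part
-- ===== SOURCE A (Python) =====
-- def is_valid_part(word, parts):
--     offset = 0
--     for length, words in parts:
--         if len(word) < offset + length:
--             return False
--         if word[offset:offset+length] not in words:
--             return False
--         offset += length
--     if len(word) > offset:
--         return False
--     return True
-- ===== SOURCE B (Python) =====
-- def is_valid_part(word, parts):
--     if not parts:
--         return word == ''
--     length, words = parts[0]
--     return (len(word) >= length
--             and word[:length] in words
--             and is_valid_part(word[length:], parts[1:]))
-- ===== Notes on version B (the rewrite author's own statement) =====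
-- stated objective: alternative
-- what changed: Replaces A's iterative offset loop over the whole word (two length guards plus a trailing check) by structural recursion on parts that consumes the word: each step peels word[:length] off the front, tests membership, and recurses on the residual suffix word[length:]; the empty-parts base case word == '' subsumes A's trailing length check.
-- outside the precondition, e.g. on is_valid_part('abcd', [(1, {'a'}), (-1, {'bc'}), (1, {'d'})]): A returns False, B returns True
import Mathlib
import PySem

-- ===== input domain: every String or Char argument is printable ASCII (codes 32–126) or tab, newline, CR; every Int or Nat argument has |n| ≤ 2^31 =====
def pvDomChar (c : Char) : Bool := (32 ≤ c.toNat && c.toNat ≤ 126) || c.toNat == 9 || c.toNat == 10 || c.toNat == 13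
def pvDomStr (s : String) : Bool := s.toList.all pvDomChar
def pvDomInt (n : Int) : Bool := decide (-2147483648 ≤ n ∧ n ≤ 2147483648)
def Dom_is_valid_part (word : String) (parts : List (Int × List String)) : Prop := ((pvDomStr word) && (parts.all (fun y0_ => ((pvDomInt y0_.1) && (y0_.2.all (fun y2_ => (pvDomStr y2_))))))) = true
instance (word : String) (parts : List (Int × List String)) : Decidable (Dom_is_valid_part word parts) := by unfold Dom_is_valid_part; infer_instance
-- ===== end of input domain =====

-- B replaces A's iterative offset loop (with its two length guards and trailing check) by
-- structural recursion on parts that consumes the word's front segment each step (objective: alternative).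

-- ===== PORT A =====
-- the 'for length, words in parts' loop with its two early returns and the trailing length check
def pvA_loop (word : String) (offset : Int) : List (Int × List String) → Bool
  | [] => if PySem.Str.len word > offset then false else true
  | (length, words) :: rest =>
    if PySem.Str.len word < offset + length then false
    else if !(words.contains (PySem.Str.slice word (some offset) (some (offset + length)))) then false
    else pvA_loop word (offset + length) rest

def is_valid_part (word : String) (parts : List (Int × List String)) : Bool :=
  pvA_loop word 0 parts

-- ===== PORT B =====
def is_valid_part_alt (word : String) (parts : List (Int × List String)) : Bool :=
  match parts with
  | [] => word == ""
  | (length, words) :: rest =>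
      decide (PySem.Str.len word ≥ length) &&
      words.contains (PySem.Str.slice word none (some length)) &&
      is_valid_part_alt (PySem.Str.slice word (some length) none) rest

-- ===== PRECONDITION & SPEC =====
-- Pre_ restricts to the function's natural domain, nonnegative segment lengths: on a negative
-- length A slices with an absolute offset while B slices the residual suffix, so their values
-- can differ there.
def Pre_is_valid_part (word : String) (parts : List (Int × List String)) : Prop :=
  ∀ p ∈ parts, 0 ≤ p.1
instance (word : String) (parts : List (Int × List String)) : Decidable (Pre_is_valid_part word parts) := by unfold Pre_is_valid_part; infer_instance

def pvWitness_is_valid_part : String × (List (Int × List String)) :=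
  ("abcd", [(2, ["ab", "cd"]), (2, ["cd"])])

def Spec_is_valid_part (word : String) (parts : List (Int × List String)) (out : Bool) : Prop := out = is_valid_part_alt word parts
instance (word : String) (parts : List (Int × List String)) (out : Bool) : Decidable (Spec_is_valid_part word parts out) := by unfold Spec_is_valid_part; infer_instance

-- ===== CLAIM (what is proved, stated in full; the proofs are below) =====
def Claim_equal_is_valid_part : Prop := ∀ (word : String) (parts : List (Int × List String)), Dom_is_valid_part word parts → Pre_is_valid_part word parts → Spec_is_valid_part word parts (is_valid_part word parts)

-- ===== LEMMAS AND PROOFS =====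

lemma pv_key (word : String) :
    ∀ (rest : List (Int × List String)) (offset : Int),
      0 ≤ offset → offset ≤ PySem.Str.len word →
      (∀ p ∈ rest, 0 ≤ p.1) →
      pvA_loop word offset rest = is_valid_part_alt (PySem.Str.slice word (some offset) none) rest := by
  have hwl : word.toList.length = word.length := by simp
  intro rest
  induction rest with
  | nil =>
    intro offset h0 hle _
    obtain ⟨o, rfl⟩ : ∃ o : Nat, offset = (o : Int) := ⟨offset.toNat, (Int.toNat_of_nonneg h0).symm⟩
    simp only [PySem.Str.len_eq, String.length_toList, Nat.cast_le] at hle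
    by_cases ho : word.length = o
    · simp [pvA_loop, is_valid_part_alt, PySem.Str.toList_slice, PySem.List.slice_from_natCast,
        ← String.toList_inj, PySem.Str.len_eq, ho, hwl]
    · have hne : PySem.Str.slice word (some (o:Int)) none ≠ "" := by
        intro h
        have := congrArg String.toList h
        simp [PySem.Str.toList_slice, PySem.List.slice_from_natCast] at this
        omega
      have hgt : o < word.length := by omega
      simp [pvA_loop, PySem.Str.len_eq, is_valid_part_alt, hgt, hne]
  | cons p rs ih =>
    obtain ⟨l, ws⟩ := p
    intro offset h0 hle hpre
    obtain ⟨o, rfl⟩ : ∃ o : Nat, offset = (o : Int) := ⟨offset.toNat, (Int.toNat_of_nonneg h0).symm⟩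
    obtain ⟨l', rfl⟩ : ∃ n : Nat, l = (n : Int) := ⟨l.toNat, (Int.toNat_of_nonneg (hpre (l, ws) List.mem_cons_self)).symm⟩
    simp only [PySem.Str.len_eq, String.length_toList, Nat.cast_le] at hle
    have hres : (PySem.Str.slice word (some (o:Int)) none).toList = word.toList.drop o := by
      simp [PySem.Str.toList_slice, PySem.List.slice_from_natCast]
    have hsl : (PySem.Str.slice word (some (o:Int)) none).length = word.length - o := by
      rw [← String.length_toList, hres, List.length_drop, hwl]
    by_cases hg : word.length < o + l'
    · have e1 : ((word.length:Int)) < (o:Int) + (l':Int) := by omega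
      have e2 : ¬ (l' ≤ word.length - o) := by omega
      simp [pvA_loop, is_valid_part_alt, PySem.Str.len_eq, hwl, e1, e2]
    · have e1 : ¬ (((word.length:Int)) < (o:Int) + (l':Int)) := by omega
      have e2 : l' ≤ word.length - o := by omega
      have hslice : PySem.Str.slice word (some (o:Int)) (some ((o:Int) + (l':Int))) =
          PySem.Str.slice (PySem.Str.slice word (some (o:Int)) none) none (some (l':Int)) := by
        apply String.toList_inj.mp
        simp [PySem.Str.toList_slice, hres, PySem.List.slice_natCast_add, PySem.List.slice_to_natCast]
      have hrec : PySem.Str.slice word (some ((o:Int) + (l':Int))) none =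
          PySem.Str.slice (PySem.Str.slice word (some (o:Int)) none) (some (l':Int)) none := by
        apply String.toList_inj.mp
        simp only [PySem.Str.toList_slice, PySem.Chars.slice_eq_listSlice, hres,
          PySem.List.slice_from_natCast]
        rw [show ((o:Int) + (l':Int)) = (((o + l' : Nat)):Int) by omega,
          PySem.List.slice_from_natCast, List.drop_drop]
      have hIH := ih ((o:Int) + (l':Int)) (by positivity)
        (by simp only [PySem.Str.len_eq, String.length_toList]; omega)
        (fun q hq => hpre q (List.mem_cons_of_mem _ hq))
      simp only [pvA_loop, is_valid_part_alt, PySem.Str.len_eq, String.length_toList,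
        hslice, hrec, hIH, ge_iff_le, hwl, hsl, e1, e2, decide_true, Bool.true_and, if_false, Nat.cast_le]
      cases hmem : ws.contains (PySem.Str.slice (PySem.Str.slice word (some (o:Int)) none) none (some (l':Int))) <;>
        simp

theorem pv_main (word : String) (parts : List (Int × List String))
    (hpre : Pre_is_valid_part word parts) :
    is_valid_part word parts = is_valid_part_alt word parts := by
  have h := pv_key word parts 0 le_rfl (by simp [PySem.Str.len_eq]) hpre
  have h0 : PySem.Str.slice word (some 0) none = word := by
    apply String.toList_inj.mp
    simp [PySem.Str.toList_slice]
  rw [is_valid_part, h, h0]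

-- ===== VERDICT (by name: the statement is the Claim_ definition above) =====
theorem is_valid_part_spec : Claim_equal_is_valid_part := by
  intro word parts _ hpre
  unfold Spec_is_valid_part
  exact pv_main word parts hpre
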